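-- pv_equiv track=rewrite | github.com/henrymcneill/Godot-GMTK-video-game- | ALL OTHER CODING PROJECTS/3D engine simulation for architects /Final_simulation_3D/Final_Simulation_3D_definition.py | creation_murs
-- ===== SOURCE A (Python) =====
-- def creation_murs(Nb_murs,bloc_liste): # créer des listes différentes pour les murs horizontaux et verticaux
--     ## REMARQUE: Pour garder la salle close/fermée, nous garderons les murs au bord de la salle activés
--
--     ## la liste horizontale (liste_H) va se lire de haut en bas, colonne par colonne
--     ## la liste verticale (liste_V) va se lire de gauche à droite, rangée par rangée
--
--     ## SIGNIFICATION:
--     ## 0 --> mur désactivé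
--     ## 1 --> mur activé
--
--
--     liste_V = [1] # liste pour les murs verticaux
--     liste_H = [1] # liste pour les murs horizontaux
--     # nous débutons avec le premier mur déja activé, car il sera de tous les cas activé
--
--
--     corriger_décalage = 0
--     # corriger le décalage de la liste engendré par l'ajout du un mur au début de chaque rangée
--
--     # définir la liste pour les murs verticaux:
--     for n_ième_bloc in range (len(bloc_liste)):
--
--         # Activer le mur du bloc d'avant, si le bloc actuel est activé
--         if bloc_liste[n_ième_bloc]==1:
--             liste_V[n_ième_bloc+corriger_décalage]= 1
--
--         # Si nous nous retrouvons au début d'une rangée, sans que nous sommes au début du programme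
--         if (n_ième_bloc)%(Nb_murs)== 0 and n_ième_bloc !=0 :
--             liste_V[n_ième_bloc+corriger_décalage]= 1 # activer le mur de fin de rangée (celle précédente)
--             liste_V.append(1) # ajouter un mur pour le début de la rangée
--             corriger_décalage += 1
--             # corriger le décalage de la liste engendré par l'ajout du mur au début de chaque rangée
--
--         liste_V.append(bloc_liste[n_ième_bloc])
--         # ajouter un mur activé/désactivé selon le bloc
--
--     liste_V [len(liste_V)-1] = 1 # activer le dernier mur de la liste, car il se trouve au bord
--
--
--
--     ## REMARQUE: Comme les murs horizontaux vont se lire de haut en bas (colonne par colonne), nous devons définir la liste horizontale différemment que la liste verticale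
--
--     corriger_décalage = 0
--     # corriger le décalage de la liste engendré par l'ajout du un mur au début de chaque rangée
--
--     # définir la liste pour les murs horizontaux:
--     for n_ième_C in range (Nb_murs):
--         for n_ième_R in range (Nb_murs):
--
--             # Activer le mur du bloc d'avant, si le bloc actuel est activé
--             if bloc_liste[(Nb_murs*n_ième_R)+ n_ième_C]==1:
--                 liste_H[n_ième_R+corriger_décalage+(n_ième_C*Nb_murs)]= 1
--
--             # Si nous nous retrouvons au début d'une colonne, sans que nous sommes au début du programme
--             if (n_ième_R)%(Nb_murs)==0 and n_ième_C !=0: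
--                 liste_H[n_ième_R+corriger_décalage+(n_ième_C*Nb_murs)]= 1 # activer le mur de fin de colonne (celle précédente)
--                 liste_H.append(1) # ajouter un mur pour le début de la colonne
--                 corriger_décalage+=1
--                 # corriger le décalage de la liste engendré par l'ajout du mur au début de chaque colonne
--
--             liste_H.append(bloc_liste[n_ième_C+(Nb_murs*n_ième_R)])
--             # ajouter un mur activé/désactivé selon le bloc
--
--     liste_H [len(liste_H)-1]=1 # activer le dernier mur de la liste, car il se trouve au bord
--
--
--     return (liste_H,liste_V)
-- ===== SOURCE B (Python) =====
-- def creation_murs(Nb_murs, bloc_liste):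
--     # Wall slot between two adjacent cells of a row/column: on iff the later
--     # cell is on, otherwise it shows the earlier cell's state.
--     def slot(before, after):
--         return 1 if after == 1 else before
--
--     liste_V = []
--     for i in range(len(bloc_liste)):
--         if i % Nb_murs == 0:              # cell i starts a row
--             if i > 0:
--                 liste_V.append(1)         # closing wall of the previous row
--             liste_V.append(1)             # opening wall of this row
--         else:
--             liste_V.append(slot(bloc_liste[i - 1], bloc_liste[i]))
--     liste_V.append(1)                     # closing wall of the last row
--
--     liste_H = []
--     for c in range(Nb_murs):
--         for r in range(Nb_murs):
--             if r == 0:                    # cell (0, c) starts a column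
--                 if c > 0:
--                     liste_H.append(1)     # closing wall of the previous column
--                 liste_H.append(1)         # opening wall of this column
--             else:
--                 liste_H.append(slot(bloc_liste[(r - 1) * Nb_murs + c],
--                                     bloc_liste[r * Nb_murs + c]))
--     liste_H.append(1)                     # closing wall of the last column
--
--     return (liste_H, liste_V)
-- ===== Notes on version B (the rewrite author's own statement) =====
-- stated objective: simpler
-- what changed: Replaces A's offset bookkeeping (corriger_decalage), in-place overwrites of already-emitted wall slots and the final patching assignment by a pure append-only emission: each wall slot is computed once from its two adjacent cells (on iff the later cell is on, else the earlier cell's state), with explicit opening/closing boundary walls.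
import Mathlib
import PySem

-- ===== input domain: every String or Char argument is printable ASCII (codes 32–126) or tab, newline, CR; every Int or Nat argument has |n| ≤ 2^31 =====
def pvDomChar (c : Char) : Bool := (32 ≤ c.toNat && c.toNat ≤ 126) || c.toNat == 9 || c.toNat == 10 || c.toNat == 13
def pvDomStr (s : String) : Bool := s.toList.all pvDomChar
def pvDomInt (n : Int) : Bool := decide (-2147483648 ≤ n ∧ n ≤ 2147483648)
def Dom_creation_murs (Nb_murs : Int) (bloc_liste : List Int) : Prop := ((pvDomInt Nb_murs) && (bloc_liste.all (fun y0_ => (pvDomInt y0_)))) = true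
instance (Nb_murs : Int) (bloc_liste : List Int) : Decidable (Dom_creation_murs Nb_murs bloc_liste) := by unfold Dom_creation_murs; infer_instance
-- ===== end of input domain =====

-- B emits each wall slot once, computed from its two adjacent cells, instead of A's offset
-- bookkeeping, in-place overwrites of already-emitted slots and final patching (objective: simpler).

-- ===== PORT A =====
-- loop body of A's first (vertical) loop, lifted to a helper
def pvStepA (Nb_murs : Int) (bloc_liste : List Int) (st : List Int × Int) (n : Nat) : List Int × Int :=
  let V1 := if PySem.List.pyGetD bloc_liste (n : Int) 0 = 1
            then PySem.List.pySetD st.1 ((n : Int) + st.2) 1 else st.1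
  let st2 := if PySem.Int.mod (n : Int) Nb_murs = 0 ∧ (n : Int) ≠ 0
             then (PySem.List.pySetD V1 ((n : Int) + st.2) 1 ++ [1], st.2 + 1)
             else (V1, st.2)
  (st2.1 ++ [PySem.List.pyGetD bloc_liste (n : Int) 0], st2.2)

-- loop body of A's inner (horizontal) loop, lifted to a helper
def pvStepAH (Nb_murs : Int) (bloc_liste : List Int) (c : Int) (st : List Int × Int) (r : Int) : List Int × Int :=
  let H1 := if PySem.List.pyGetD bloc_liste (Nb_murs * r + c) 0 = 1
            then PySem.List.pySetD st.1 (r + st.2 + c * Nb_murs) 1 else st.1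
  let st2 := if PySem.Int.mod r Nb_murs = 0 ∧ c ≠ 0
             then (PySem.List.pySetD H1 (r + st.2 + c * Nb_murs) 1 ++ [1], st.2 + 1)
             else (H1, st.2)
  (st2.1 ++ [PySem.List.pyGetD bloc_liste (c + Nb_murs * r) 0], st2.2)

def creation_murs (Nb_murs : Int) (bloc_liste : List Int) : List Int × List Int :=
  let vc := (List.range bloc_liste.length).foldl (pvStepA Nb_murs bloc_liste) ([1], 0)
  let liste_V := PySem.List.pySetD vc.1 ((vc.1.length : Int) - 1) 1
  let hc := (PySem.List.pyRange 0 Nb_murs 1).foldl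
      (fun st c => (PySem.List.pyRange 0 Nb_murs 1).foldl (pvStepAH Nb_murs bloc_liste c) st) ([1], 0)
  let liste_H := PySem.List.pySetD hc.1 ((hc.1.length : Int) - 1) 1
  (liste_H, liste_V)

-- ===== PORT B =====
-- B's helper `slot`: the wall between two adjacent cells
def pvSlot (before after : Int) : Int := if after = 1 then 1 else before

-- body of B's vertical loop
def pvStepBV (Nb_murs : Int) (bloc_liste : List Int) (acc : List Int) (i : Nat) : List Int :=
  if PySem.Int.mod (i : Int) Nb_murs = 0 then
    (if 0 < i then acc ++ [1] else acc) ++ [1]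
  else
    acc ++ [pvSlot (PySem.List.pyGetD bloc_liste ((i : Int) - 1) 0)
                   (PySem.List.pyGetD bloc_liste (i : Int) 0)]

-- body of B's inner horizontal loop
def pvStepBH (Nb_murs : Int) (bloc_liste : List Int) (c : Int) (acc : List Int) (r : Int) : List Int :=
  if r = 0 then
    (if 0 < c then acc ++ [1] else acc) ++ [1]
  else
    acc ++ [pvSlot (PySem.List.pyGetD bloc_liste ((r - 1) * Nb_murs + c) 0)
                   (PySem.List.pyGetD bloc_liste (r * Nb_murs + c) 0)]

def creation_murs_alt (Nb_murs : Int) (bloc_liste : List Int) : List Int × List Int :=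
  let liste_V := (List.range bloc_liste.length).foldl (pvStepBV Nb_murs bloc_liste) [] ++ [1]
  let liste_H := (PySem.List.pyRange 0 Nb_murs 1).foldl
      (fun acc c => (PySem.List.pyRange 0 Nb_murs 1).foldl (pvStepBH Nb_murs bloc_liste c) acc) [] ++ [1]
  (liste_H, liste_V)

-- ===== PRECONDITION & SPEC =====
-- Pre_ is exactly where A returns: outside it A raises ZeroDivisionError (Nb_murs = 0 with a
-- nonempty list) or IndexError (1 ≤ Nb_murs with fewer than Nb_murs² blocks).
def Pre_creation_murs (Nb_murs : Int) (bloc_liste : List Int) : Prop :=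
  (1 ≤ Nb_murs ∧ Nb_murs * Nb_murs ≤ (bloc_liste.length : Int))
  ∨ (Nb_murs = 0 ∧ bloc_liste = [])
  ∨ Nb_murs ≤ -1
instance (Nb_murs : Int) (bloc_liste : List Int) : Decidable (Pre_creation_murs Nb_murs bloc_liste) := by
  unfold Pre_creation_murs; infer_instance

def pvWitness_creation_murs : Int × List Int := (2, [0, 1, 0, 0])

def Spec_creation_murs (Nb_murs : Int) (bloc_liste : List Int) (out : List Int × List Int) : Prop := out = creation_murs_alt Nb_murs bloc_liste
instance (Nb_murs : Int) (bloc_liste : List Int) (out : List Int × List Int) : Decidable (Spec_creation_murs Nb_murs bloc_liste out) := by unfold Spec_creation_murs; infer_instance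

-- ===== CLAIM (what is proved, stated in full; the proofs are below) =====
def Claim_equal_creation_murs : Prop := ∀ (Nb_murs : Int) (bloc_liste : List Int), Dom_creation_murs Nb_murs bloc_liste → Pre_creation_murs Nb_murs bloc_liste → Spec_creation_murs Nb_murs bloc_liste (creation_murs Nb_murs bloc_liste)

-- ===== LEMMAS AND PROOFS =====

-- generic step of A's loop over an abstract cell function `get` (width m)
def pvStep (m : Nat) (get : Nat → Int) (st : List Int × Int) (n : Nat) : List Int × Int :=
  let V1 := if get n = 1 then PySem.List.pySetD st.1 ((n : Int) + st.2) 1 else st.1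
  let st2 := if n % m = 0 ∧ n ≠ 0
             then (PySem.List.pySetD V1 ((n : Int) + st.2) 1 ++ [1], st.2 + 1)
             else (V1, st.2)
  (st2.1 ++ [get n], st2.2)

-- generic step of B's loop over an abstract cell function `get` (width m)
def pvStepB (m : Nat) (get : Nat → Int) (acc : List Int) (i : Nat) : List Int :=
  if i % m = 0 then (if 0 < i then acc ++ [1] else acc) ++ [1]
  else acc ++ [pvSlot (get (i - 1)) (get i)]

-- interior slots plus the running last cell, scanned from `prev`
def pvChain (prev : Int) (ys : List Int) : List Int :=
  match ys with
  | [] => [prev]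
  | y :: t => (if y = 1 then 1 else prev) :: pvChain y t

-- first s wall slots of chunk j before its trailing wall is forced to 1
def pvOpen (m : Nat) (get : Nat → Int) (j s : Nat) : List Int :=
  1 :: pvChain (get (j * m)) ((List.range' (j * m + 1) (s - 1)).map get)

-- finished wall line of chunk j (s cells)
def pvClosed (m : Nat) (get : Nat → Int) (j s : Nat) : List Int :=
  (pvOpen m get j s).dropLast ++ [1]

-- the cell functions the loops read through
def pvGetA (bloc : List Int) : Nat → Int := fun n => PySem.List.pyGetD bloc (n : Int) 0
def pvGetH (m : Nat) (bloc : List Int) : Nat → Int :=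
  fun p => PySem.List.pyGetD bloc ((m : Int) * ((p % m : Nat) : Int) + ((p / m : Nat) : Int)) 0

theorem pvChain_ne_nil (prev : Int) (ys : List Int) : pvChain prev ys ≠ [] := by
  cases ys <;> simp [pvChain]

theorem pvChain_length (prev : Int) (ys : List Int) : (pvChain prev ys).length = ys.length + 1 := by
  induction ys generalizing prev with
  | nil => simp [pvChain]
  | cons y t ih => simp [pvChain, ih]

theorem pvSetD_append_last {α : Type} (P : List α) (a v : α) :
    PySem.List.pySetD (P ++ [a]) ((P.length : Int)) v = P ++ [v] := by
  rw [PySem.List.pySetD_natCast]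
  induction P with
  | nil => rfl
  | cons h t ih => simp only [List.cons_append, List.length_cons, List.set_cons_succ, ih]

theorem pvOpen_length (m : Nat) (get : Nat → Int) (j s : Nat) (hs : 1 ≤ s) :
    (pvOpen m get j s).length = s + 1 := by
  simp [pvOpen, pvChain_length]
  omega

theorem pvFlatten_length (m : Nat) (hm : 1 ≤ m) (get : Nat → Int) :
    ∀ q, (((List.range q).map (fun j => pvClosed m get j m)).flatten).length = q * (m + 1) := by
  intro q
  induction q with
  | zero => simp
  | succ q ih =>
    have hcl : (pvClosed m get q m).length = m + 1 := by
      simp [pvClosed, pvOpen_length m get q m hm]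
    rw [List.range_succ, List.map_append, List.flatten_append, List.length_append, ih]
    simp [hcl]
    ring

theorem pvStep_plain (m : Nat) (get : Nat → Int) (Q : List Int) (prev : Int) (n : Nat) (k : Int)
    (hcond : ¬(n % m = 0 ∧ n ≠ 0)) (hlen : ((Q.length : Int)) = (n : Int) + k) :
    pvStep m get (Q ++ [prev], k) n = ((Q ++ [if get n = 1 then 1 else prev]) ++ [get n], k) := by
  have hs1 : PySem.List.pySetD (Q ++ [prev]) ((n : Int) + k) 1 = Q ++ [1] := by
    rw [show ((n : Int) + k) = ((Q.length : Int)) by omega]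
    exact pvSetD_append_last Q prev 1
  unfold pvStep
  by_cases h : get n = 1 <;> simp [h, hcond, hs1]

theorem pvStep_boundary (m : Nat) (get : Nat → Int) (Q : List Int) (aa : Int) (n : Nat) (k : Int)
    (hcond : n % m = 0 ∧ n ≠ 0) (hlen : ((Q.length : Int)) = (n : Int) + k) :
    pvStep m get (Q ++ [aa], k) n = (((Q ++ [1]) ++ [1]) ++ [get n], k + 1) := by
  have hs1 : PySem.List.pySetD (Q ++ [aa]) ((n : Int) + k) 1 = Q ++ [1] := by
    rw [show ((n : Int) + k) = ((Q.length : Int)) by omega]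
    exact pvSetD_append_last Q aa 1
  have hs2 : PySem.List.pySetD (Q ++ [1]) ((n : Int) + k) 1 = Q ++ [1] := by
    rw [show ((n : Int) + k) = ((Q.length : Int)) by omega]
    exact pvSetD_append_last Q 1 1
  unfold pvStep
  by_cases h : get n = 1 <;> simp [h, hcond, hs1, hs2]

theorem pvInner (m : Nat) (get : Nat → Int) :
  ∀ (L s : Nat) (P : List Int) (prev : Int) (k : Int),
    (∀ t, t < L → ¬((s + t) % m = 0 ∧ (s + t) ≠ 0)) →
    ((P.length : Int) = (s : Int) + k) →
    (List.range' s L).foldl (pvStep m get) (P ++ [prev], k)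
      = (P ++ pvChain prev ((List.range' s L).map get), k) := by
  intro L
  induction L with
  | zero => intro s P prev k hmod hlen; simp [pvChain]
  | succ L ih =>
    intro s P prev k hmod hlen
    rw [List.range'_succ, List.foldl_cons]
    have hmod0 : ¬ (s % m = 0 ∧ s ≠ 0) := by
      have := hmod 0 (by omega); simpa using this
    rw [pvStep_plain m get P prev s k hmod0 hlen]
    rw [ih (s + 1) (P ++ [if get s = 1 then 1 else prev]) (get s) k
      (fun t ht => by
        have := hmod (t + 1) (by omega)
        rwa [show s + (t + 1) = s + 1 + t from by omega] at this)
      (by simp; omega)]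
    simp [pvChain, List.append_assoc]

theorem pvMainGen (m : Nat) (hm : 1 ≤ m) (get : Nat → Int) :
  ∀ R, ∀ s, 1 ≤ s → s ≤ m →
  (List.range (R * m + s)).foldl (pvStep m get) ([1], 0)
    = (((List.range R).map (fun j => pvClosed m get j m)).flatten ++ pvOpen m get R s, (R : Int)) := by
  intro R
  induction R with
  | zero =>
    intro s hs1 hs2
    rw [show 0 * m + s = s from by omega]
    have h1 : List.range s = 0 :: List.range' 1 (s - 1) := by
      obtain ⟨s', rfl⟩ : ∃ s', s = s' + 1 := ⟨s - 1, by omega⟩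
      rw [List.range_eq_range', List.range'_succ]
      simp
    rw [h1, List.foldl_cons]
    have hstep0 : pvStep m get (([1], 0) : List Int × Int) 0 = ([(1 : Int)] ++ [get 0], 0) := by
      have h00 : ([(1 : Int)], (0 : Int)) = (([] : List Int) ++ [(1 : Int)], (0 : Int)) := by simp
      rw [h00, pvStep_plain m get [] 1 0 0 (by simp) (by simp)]
      simp
    rw [hstep0, pvInner m get (s - 1) 1 [1] (get 0) 0
      (fun t ht => by
        rintro ⟨hmm, _⟩
        rw [Nat.mod_eq_of_lt (by omega)] at hmm
        omega)
      (by simp)]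
    simp [pvOpen]
  | succ R ih =>
    intro s hs1 hs2
    have hsplit : List.range ((R + 1) * m + s) = List.range (R * m + m) ++ List.range' (R * m + m) s := by
      rw [show (R + 1) * m + s = (R * m + m) + s by ring, List.range_add, List.range'_eq_map_range]
    rw [hsplit, List.foldl_append, ih m hm (le_refl m)]
    have hsplit2 : List.range' (R * m + m) s = (R * m + m) :: List.range' (R * m + m + 1) (s - 1) := by
      obtain ⟨s', rfl⟩ : ∃ s', s = s' + 1 := ⟨s - 1, by omega⟩
      rw [List.range'_succ]; simp
    rw [hsplit2, List.foldl_cons]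
    set F := ((List.range R).map (fun j => pvClosed m get j m)).flatten with hF
    have hone : pvOpen m get R m ≠ [] := by simp [pvOpen]
    set D := (pvOpen m get R m).dropLast with hD
    set a := (pvOpen m get R m).getLast hone with ha
    have hdecomp : F ++ pvOpen m get R m = (F ++ D) ++ [a] := by
      rw [hD, ha, List.append_assoc, List.dropLast_append_getLast hone]
    have hlenFD : (((F ++ D).length : Nat) : Int) = ((R * m + m : Nat) : Int) + (R : Int) := by
      have h1 : F.length = R * (m + 1) := pvFlatten_length m hm get R
      have h2 : D.length = m := by
        rw [hD, List.length_dropLast, pvOpen_length m get R m hm]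
        omega
      simp [h1, h2]
      ring
    have hcond : (R * m + m) % m = 0 ∧ R * m + m ≠ 0 := by
      constructor
      · rw [show R * m + m = (R + 1) * m by ring]
        exact Nat.mul_mod_left (R + 1) m
      · have : 1 * 1 ≤ (R + 1) * m := Nat.mul_le_mul (by omega) hm
        omega
    rw [hdecomp, pvStep_boundary m get (F ++ D) a (R * m + m) ((R : Int)) hcond hlenFD]
    have hFclosed : (F ++ D) ++ [1] = ((List.range (R + 1)).map (fun j => pvClosed m get j m)).flatten := by
      rw [List.range_succ, List.map_append, List.flatten_append, ← hF]
      simp [pvClosed, ← hD, List.append_assoc]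
    rw [hFclosed]
    rw [pvInner m get (s - 1) (R * m + m + 1)
      (((List.range (R + 1)).map (fun j => pvClosed m get j m)).flatten ++ [1]) (get (R * m + m)) ((R : Int) + 1)
      (fun t ht => by
        rintro ⟨hmm, _⟩
        rw [show R * m + m + 1 + t = m * (R + 1) + (1 + t) by ring, Nat.mul_add_mod,
          Nat.mod_eq_of_lt (by omega)] at hmm
        omega)
      (by
        simp [pvFlatten_length m hm get (R + 1)]
        ring)]
    simp only [Prod.mk.injEq]
    refine ⟨?_, by push_cast; ring⟩
    rw [List.append_assoc]
    congr 1
    simp [pvOpen, Nat.succ_mul]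

theorem pvFix (m : Nat) (get : Nat → Int) (X : List Int) (j s : Nat) :
  PySem.List.pySetD (X ++ pvOpen m get j s) ((((X ++ pvOpen m get j s).length : Nat) : Int) - 1) 1
    = X ++ pvClosed m get j s := by
  have hone : pvOpen m get j s ≠ [] := by simp [pvOpen]
  rw [← List.dropLast_append_getLast hone, ← List.append_assoc]
  have hl : ((((X ++ (pvOpen m get j s).dropLast) ++ [(pvOpen m get j s).getLast hone]).length : Nat) : Int) - 1
      = (((X ++ (pvOpen m get j s).dropLast).length : Nat) : Int) := by
    simp
    omega
  rw [hl, pvSetD_append_last, pvClosed, List.append_assoc]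

theorem pvStepA_eq (N : Int) (_hN : N ≠ 0) (bloc : List Int) (st : List Int × Int) (n : Nat) :
    pvStepA N bloc st n = pvStep N.natAbs (pvGetA bloc) st n := by
  unfold pvStepA pvStep pvGetA
  have hc : (PySem.Int.mod (n : Int) N = 0 ∧ (n : Int) ≠ 0) = (n % N.natAbs = 0 ∧ n ≠ 0) := by
    apply propext
    apply and_congr
    · rw [PySem.Int.mod_eq_zero_iff_dvd, ← Int.natAbs_dvd, Int.natCast_dvd_natCast]
      constructor
      · intro h
        obtain ⟨k, hk⟩ := h
        simp [hk, Nat.mul_mod_right]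
      · exact fun h => Nat.dvd_of_mod_eq_zero h
    · simp
  simp only [hc]

theorem pvStepAH_eq (m : Nat) (hm : 1 ≤ m) (bloc : List Int) (c r : Nat) (hrm : r < m)
    (st : List Int × Int) :
    pvStepAH (m : Int) bloc (c : Int) st (r : Int) = pvStep m (pvGetH m bloc) st (c * m + r) := by
  have hmod : (c * m + r) % m = r := by
    rw [mul_comm, Nat.mul_add_mod]; exact Nat.mod_eq_of_lt hrm
  have hdiv : (c * m + r) / m = c := by
    rw [mul_comm, Nat.mul_add_div (by omega)]
    simp [Nat.div_eq_of_lt hrm]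
  unfold pvStepAH pvStep pvGetH
  simp only [hmod, hdiv]
  have hidx : ((r : Int) + st.2 + (c : Int) * (m : Int)) = (((c * m + r : Nat) : Int) + st.2) := by
    push_cast; ring
  have hcond : (PySem.Int.mod (r : Int) (m : Int) = 0 ∧ (c : Int) ≠ 0) = (r = 0 ∧ c * m + r ≠ 0) := by
    apply propext
    simp only [PySem.Int.mod_natCast, Nat.mod_eq_of_lt hrm, ne_eq, Nat.cast_eq_zero]
    constructor
    · rintro ⟨rfl, h2⟩
      refine ⟨rfl, ?_⟩
      intro h0
      rcases Nat.mul_eq_zero.mp (by simpa using h0) with hc | hmz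
      · exact h2 hc
      · omega
    · rintro ⟨rfl, h2⟩
      refine ⟨rfl, ?_⟩
      intro h0
      exact h2 (by simp [h0])
  have hread : ((c : Int) + (m : Int) * (r : Int)) = ((m : Int) * (r : Int) + (c : Int)) := by ring
  simp only [hidx, hcond, hread]

theorem pvFoldRangeMul {α : Type} (m : Nat) (g : α → Nat → α) :
    ∀ (C : Nat) (init : α), (List.range (C * m)).foldl g init
      = (List.range C).foldl (fun st c => (List.range m).foldl (fun st' r => g st' (c * m + r)) st) init := by
  intro C
  induction C with
  | zero => intro init; simp
  | succ C ih =>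
    intro init
    rw [show (C + 1) * m = C * m + m by ring, List.range_add, List.foldl_append, ih,
      List.range_succ, List.foldl_append]
    simp [List.foldl_map]

theorem pvHLoop (m : Nat) (hm : 1 ≤ m) (bloc : List Int) :
    PySem.List.pySetD (((PySem.List.pyRange 0 (m : Int) 1).foldl
        (fun st c => (PySem.List.pyRange 0 (m : Int) 1).foldl (pvStepAH (m : Int) bloc c) st) ([1], 0)).1)
        (((((PySem.List.pyRange 0 (m : Int) 1).foldl
        (fun st c => (PySem.List.pyRange 0 (m : Int) 1).foldl (pvStepAH (m : Int) bloc c) st) ([1], 0)).1.length : Nat) : Int) - 1) 1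
      = ((List.range m).map (fun j => pvClosed m (pvGetH m bloc) j m)).flatten := by
  obtain ⟨m', rfl⟩ : ∃ m', m = m' + 1 := ⟨m - 1, by omega⟩
  have h0 : (PySem.List.pyRange 0 ((m' + 1 : Nat) : Int) 1).foldl
        (fun st c => (PySem.List.pyRange 0 ((m' + 1 : Nat) : Int) 1).foldl (pvStepAH ((m' + 1 : Nat) : Int) bloc c) st) ([1], 0)
      = (List.range ((m' + 1) * (m' + 1))).foldl (pvStep (m' + 1) (pvGetH (m' + 1) bloc)) ([1], 0) := by
    rw [pvFoldRangeMul (m' + 1) _ (m' + 1), PySem.List.pyRange_zero_nat, List.foldl_map]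
    apply PySem.List.foldl_congr_mem
    intro acc c hc
    rw [List.foldl_map]
    apply PySem.List.foldl_congr_mem
    intro acc' r hr
    exact pvStepAH_eq (m' + 1) hm bloc c r (List.mem_range.mp hr) acc'
  rw [h0, show (m' + 1) * (m' + 1) = m' * (m' + 1) + (m' + 1) by ring,
    pvMainGen (m' + 1) hm _ m' (m' + 1) (by omega) (le_refl _), pvFix]
  rw [List.range_succ, List.map_append, List.flatten_append]
  simp

-- ---- B-side characterisation ----

-- interior wall slots of a chunk are the slot function mapped over its cell indices
theorem pvIntsMap (get : Nat → Int) :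
    ∀ (k a : Nat), (List.range' (a + 1) k).map (fun i => pvSlot (get (i - 1)) (get i))
      = (pvChain (get a) ((List.range' (a + 1) k).map get)).dropLast := by
  intro k
  induction k with
  | zero => intro a; simp [pvChain]
  | succ k ih =>
    intro a
    rw [List.range'_succ, List.map_cons, List.map_cons, ih (a + 1)]
    simp only [pvChain, Nat.add_sub_cancel,
      List.dropLast_cons_of_ne_nil (pvChain_ne_nil (get (a + 1)) _)]
    rfl

-- over a boundary-free stretch, B's fold just appends the mapped slots
theorem pvInnerB (m : Nat) (get : Nat → Int) (L s : Nat) (acc : List Int)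
    (hmod : ∀ t, t < L → ¬ (s + t) % m = 0) :
    (List.range' s L).foldl (pvStepB m get) acc
      = acc ++ (List.range' s L).map (fun i => pvSlot (get (i - 1)) (get i)) := by
  induction L generalizing s acc with
  | zero => simp
  | succ L ih =>
    rw [List.range'_succ, List.foldl_cons, List.map_cons,
      show pvStepB m get acc s = acc ++ [pvSlot (get (s - 1)) (get s)] from by
        unfold pvStepB
        rw [if_neg (by have := hmod 0 (by omega); simpa using this)]]
    rw [ih (s + 1) _ (fun t ht => by
      have := hmod (t + 1) (by omega)
      rwa [show s + (t + 1) = s + 1 + t from by omega] at this)]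
    simp [List.append_assoc]

theorem pvMainGenB (m : Nat) (hm : 1 ≤ m) (get : Nat → Int) :
  ∀ R, ∀ s, 1 ≤ s → s ≤ m →
  (List.range (R * m + s)).foldl (pvStepB m get) []
    = ((List.range R).map (fun j => pvClosed m get j m)).flatten ++ (pvOpen m get R s).dropLast := by
  intro R
  induction R with
  | zero =>
    intro s hs1 hs2
    rw [show 0 * m + s = s from by omega]
    have h1 : List.range s = 0 :: List.range' 1 (s - 1) := by
      obtain ⟨s', rfl⟩ : ∃ s', s = s' + 1 := ⟨s - 1, by omega⟩
      rw [List.range_eq_range', List.range'_succ]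
      simp
    rw [h1, List.foldl_cons,
      show pvStepB m get [] 0 = [1] from by unfold pvStepB; simp,
      pvInnerB m get (s - 1) 1 [1] (fun t ht => by
        rw [Nat.mod_eq_of_lt (by omega)]
        omega)]
    rw [pvIntsMap get (s - 1) 0]
    simp only [pvOpen, Nat.zero_mul, Nat.zero_add,
      List.dropLast_cons_of_ne_nil (pvChain_ne_nil (get 0) _)]
    rfl
  | succ R ih =>
    intro s hs1 hs2
    have hsplit : List.range ((R + 1) * m + s) = List.range (R * m + m) ++ List.range' (R * m + m) s := by
      rw [show (R + 1) * m + s = (R * m + m) + s by ring, List.range_add, List.range'_eq_map_range]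
    rw [hsplit, List.foldl_append, ih m hm (le_refl m)]
    have hsplit2 : List.range' (R * m + m) s = (R * m + m) :: List.range' (R * m + m + 1) (s - 1) := by
      obtain ⟨s', rfl⟩ : ∃ s', s = s' + 1 := ⟨s - 1, by omega⟩
      rw [List.range'_succ]; simp
    set F := ((List.range R).map (fun j => pvClosed m get j m)).flatten with hF
    rw [hsplit2, List.foldl_cons,
      show pvStepB m get (F ++ (pvOpen m get R m).dropLast) (R * m + m)
          = ((F ++ (pvOpen m get R m).dropLast) ++ [1]) ++ [1] from by
        unfold pvStepB
        rw [if_pos (by rw [show R * m + m = (R + 1) * m by ring]; exact Nat.mul_mod_left (R + 1) m),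
          if_pos (by have : 1 * 1 ≤ (R + 1) * m := Nat.mul_le_mul (by omega) hm; omega)]]
    rw [pvInnerB m get (s - 1) (R * m + m + 1) _ (fun t ht => by
      rw [show R * m + m + 1 + t = m * (R + 1) + (1 + t) by ring, Nat.mul_add_mod,
        Nat.mod_eq_of_lt (by omega)]
      omega)]
    rw [pvIntsMap get (s - 1) (R * m + m)]
    have hFclosed : ((F ++ (pvOpen m get R m).dropLast) ++ [1])
        = ((List.range (R + 1)).map (fun j => pvClosed m get j m)).flatten := by
      rw [List.range_succ, List.map_append, List.flatten_append, ← hF]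
      simp [pvClosed, List.append_assoc]
    rw [hFclosed]
    rw [List.append_assoc]
    congr 1
    simp only [pvOpen, show (R + 1) * m = R * m + m from by ring,
      List.dropLast_cons_of_ne_nil (pvChain_ne_nil _ _)]
    rfl

theorem pvStepBV_eq (N : Int) (_hN : N ≠ 0) (bloc : List Int) (acc : List Int) (i : Nat) :
    pvStepBV N bloc acc i = pvStepB N.natAbs (pvGetA bloc) acc i := by
  unfold pvStepBV pvStepB pvSlot pvGetA
  have hc : PySem.Int.mod (i : Int) N = 0 ↔ i % N.natAbs = 0 := by
    rw [PySem.Int.mod_eq_zero_iff_dvd, ← Int.natAbs_dvd, Int.natCast_dvd_natCast]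
    constructor
    · intro h
      obtain ⟨k, hk⟩ := h
      simp [hk, Nat.mul_mod_right]
    · exact fun h => Nat.dvd_of_mod_eq_zero h
  by_cases h0 : i % N.natAbs = 0
  · rw [if_pos (hc.mpr h0), if_pos h0]
  · rw [if_neg (fun h => h0 (hc.mp h)), if_neg h0]
    have hi1 : 1 ≤ i := by
      rcases Nat.eq_zero_or_pos i with rfl | h
      · simp at h0
      · omega
    rw [show ((i : Int) - 1) = (((i - 1 : Nat) : Nat) : Int) by omega]

theorem pvStepBH_eq (m : Nat) (hm : 1 ≤ m) (bloc : List Int) (c r : Nat) (hrm : r < m)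
    (acc : List Int) :
    pvStepBH (m : Int) bloc (c : Int) acc (r : Int) = pvStepB m (pvGetH m bloc) acc (c * m + r) := by
  have hmod : (c * m + r) % m = r := by
    rw [mul_comm, Nat.mul_add_mod]; exact Nat.mod_eq_of_lt hrm
  have hdiv : (c * m + r) / m = c := by
    rw [mul_comm, Nat.mul_add_div (by omega)]
    simp [Nat.div_eq_of_lt hrm]
  unfold pvStepBH pvStepB pvGetH pvSlot
  simp only [hmod, hdiv]
  by_cases hr0 : r = 0
  · subst hr0
    rw [if_pos (show ((0 : Nat) : Int) = 0 from by norm_num), if_pos (show (0 : Nat) = 0 from rfl)]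
    by_cases hc0 : 0 < c
    · rw [if_pos (by exact_mod_cast hc0),
        if_pos (show 0 < c * m + 0 from by have : 1 * 1 ≤ c * m := Nat.mul_le_mul hc0 hm; omega)]
    · rw [if_neg (by exact_mod_cast hc0),
        if_neg (show ¬ 0 < c * m + 0 from by
          have hcz : c = 0 := by omega
          subst hcz
          simp)]
  · have h1 : c * m + r - 1 = c * m + (r - 1) := by omega
    have hmod2 : (c * m + (r - 1)) % m = r - 1 := by
      rw [mul_comm, Nat.mul_add_mod]; exact Nat.mod_eq_of_lt (by omega)
    have hdiv2 : (c * m + (r - 1)) / m = c := by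
      rw [mul_comm, Nat.mul_add_div (by omega)]
      simp [Nat.div_eq_of_lt (show r - 1 < m by omega)]
    rw [if_neg (show ¬ (r : Int) = 0 from by exact_mod_cast hr0), if_neg hr0, h1]
    simp only [hmod2, hdiv2]
    rw [show ((r : Int) - 1) * (m : Int) + (c : Int)
          = (m : Int) * (((r - 1 : Nat) : Nat) : Int) + (c : Int) from by
        push_cast [show (((r - 1 : Nat) : Nat) : Int) = (r : Int) - 1 by omega]; ring,
      show (r : Int) * (m : Int) + (c : Int) = (m : Int) * (r : Int) + (c : Int) from by ring]

-- both flat results for a nonempty list and nonzero width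
theorem pvVBoth (N : Int) (hN : N ≠ 0) (bloc : List Int) (hb : bloc ≠ []) :
    PySem.List.pySetD (((List.range bloc.length).foldl (pvStepA N bloc) ([1], 0)).1)
        (((((List.range bloc.length).foldl (pvStepA N bloc) ([1], 0)).1.length : Nat) : Int) - 1) 1
      = (List.range bloc.length).foldl (pvStepBV N bloc) [] ++ [1] := by
  have hm : 1 ≤ N.natAbs := Int.natAbs_pos.mpr hN
  obtain ⟨R, s, h1, h2, hlen⟩ : ∃ R s, 1 ≤ s ∧ s ≤ N.natAbs ∧ bloc.length = R * N.natAbs + s := by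
    have hlen1 : 1 ≤ bloc.length := List.length_pos_iff.mpr hb
    refine ⟨(bloc.length - 1) / N.natAbs, (bloc.length - 1) % N.natAbs + 1, by omega, ?_, ?_⟩
    · have := Nat.mod_lt (bloc.length - 1) (show 0 < N.natAbs by omega)
      omega
    · have hdm := Nat.div_add_mod (bloc.length - 1) N.natAbs
      have hcm : (bloc.length - 1) / N.natAbs * N.natAbs = N.natAbs * ((bloc.length - 1) / N.natAbs) :=
        Nat.mul_comm _ _
      omega
  have hA : (List.range bloc.length).foldl (pvStepA N bloc) ([1], 0)
      = (List.range (R * N.natAbs + s)).foldl (pvStep N.natAbs (pvGetA bloc)) ([1], 0) := by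
    rw [hlen]
    apply PySem.List.foldl_congr_mem
    intro acc x _
    exact pvStepA_eq N hN bloc acc x
  have hB : (List.range bloc.length).foldl (pvStepBV N bloc) []
      = (List.range (R * N.natAbs + s)).foldl (pvStepB N.natAbs (pvGetA bloc)) [] := by
    rw [hlen]
    apply PySem.List.foldl_congr_mem
    intro acc x _
    exact pvStepBV_eq N hN bloc acc x
  rw [hA, hB, pvMainGen N.natAbs hm _ R s h1 h2, pvFix, pvMainGenB N.natAbs hm _ R s h1 h2,
    List.append_assoc]
  rfl

-- B's horizontal double fold for a positive width
theorem pvHLoopB (m : Nat) (hm : 1 ≤ m) (bloc : List Int) :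
    (PySem.List.pyRange 0 (m : Int) 1).foldl
        (fun acc c => (PySem.List.pyRange 0 (m : Int) 1).foldl (pvStepBH (m : Int) bloc c) acc) [] ++ [1]
      = ((List.range m).map (fun j => pvClosed m (pvGetH m bloc) j m)).flatten := by
  obtain ⟨m', rfl⟩ : ∃ m', m = m' + 1 := ⟨m - 1, by omega⟩
  have h0 : (PySem.List.pyRange 0 ((m' + 1 : Nat) : Int) 1).foldl
        (fun acc c => (PySem.List.pyRange 0 ((m' + 1 : Nat) : Int) 1).foldl (pvStepBH ((m' + 1 : Nat) : Int) bloc c) acc) []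
      = (List.range ((m' + 1) * (m' + 1))).foldl (pvStepB (m' + 1) (pvGetH (m' + 1) bloc)) [] := by
    rw [pvFoldRangeMul (m' + 1) _ (m' + 1), PySem.List.pyRange_zero_nat, List.foldl_map]
    apply PySem.List.foldl_congr_mem
    intro acc c hc
    rw [List.foldl_map]
    apply PySem.List.foldl_congr_mem
    intro acc' r hr
    exact pvStepBH_eq (m' + 1) hm bloc c r (List.mem_range.mp hr) acc'
  rw [h0, show (m' + 1) * (m' + 1) = m' * (m' + 1) + (m' + 1) by ring,
    pvMainGenB (m' + 1) hm _ m' (m' + 1) (by omega) (le_refl _), List.append_assoc]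
  rw [List.range_succ, List.map_append, List.flatten_append]
  simp [pvClosed]

theorem pvSetD_single :
    PySem.List.pySetD [(1 : Int)] ((([(1 : Int)].length : Nat) : Int) - 1) 1 = [1] := by
  decide

-- ===== VERDICT (by name: the statement is the Claim_ definition above) =====
theorem creation_murs_spec : Claim_equal_creation_murs := by
  intro N bloc _ hpre
  unfold Spec_creation_murs
  show creation_murs N bloc = creation_murs_alt N bloc
  rcases hpre with ⟨h1, hlen⟩ | ⟨rfl, rfl⟩ | hneg
  · obtain ⟨m, rfl⟩ : ∃ m : Nat, N = (m : Int) := ⟨N.toNat, (Int.toNat_of_nonneg (by omega)).symm⟩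
    have hm : 1 ≤ m := by exact_mod_cast h1
    have hb : bloc ≠ [] := by
      intro h0
      rw [h0] at hlen
      simp at hlen
      nlinarith
    simp only [creation_murs, creation_murs_alt, Prod.mk.injEq]
    refine ⟨?_, pvVBoth (m : Int) (by omega) bloc hb⟩
    rw [pvHLoop m hm bloc, ← pvHLoopB m hm bloc]
  · decide
  · have hN : N ≠ 0 := by omega
    simp only [creation_murs, creation_murs_alt, Prod.mk.injEq]
    constructor
    · rw [PySem.List.pyRange_one_eq_nil (by omega : N ≤ 0)]
      simp only [List.foldl_nil]
      rw [pvSetD_single]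
      rfl
    · by_cases hb : bloc = []
      · subst hb
        simp only [List.length_nil, List.range_zero, List.foldl_nil]
        rw [pvSetD_single]
        rfl
      · exact pvVBoth N hN bloc hb
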